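-- pv_equiv track=rewrite | github.com/LutzGue/projects | romannumeral_generator/__archive/__romannumeral_generator_V004.py | add_brackets
-- ===== SOURCE A (Python) =====
-- def add_brackets(s: str, h_limit: int, f_limit: int, e_limit: int, h=0, f=0, e=0) -> set:
--     if h >= h_limit or f >= f_limit or e >= e_limit or len(s) <= 2:
--         return {s}
--     else:
--         results = set()
--         for i in range(1, min(e_limit, len(s)) + 1):
--             for j in range(len(s) - i + 1):
--                 if s[j:j+i].strip():
--                     t = s[:j] + '(' + s[j:j+i] + ')' + s[j+i:]
--                     if '()' not in t:
--                         results.add(t)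
--                         results.update(add_brackets(t, h_limit, f_limit, e_limit, h+1, f+1, e+1))
--         return results
-- ===== SOURCE B (Python) =====
-- def add_brackets(s: str, h_limit: int, f_limit: int, e_limit: int, h=0, f=0, e=0) -> set:
--     # The three counters advance in lockstep, so the recursion state collapses to
--     # (string, remaining depth); memoize each such state so it is expanded only once.
--     cache = {}
--
--     def go(s, d):
--         if d <= 0 or len(s) <= 2:
--             return {s}
--         hit = cache.get((s, d))
--         if hit is not None:
--             return hit
--         results = set()
--         for i in range(1, min(e_limit, len(s)) + 1):
--             for j in range(len(s) - i + 1):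
--                 if s[j:j+i].strip():
--                     t = s[:j] + '(' + s[j:j+i] + ')' + s[j+i:]
--                     if '()' not in t:
--                         results.add(t)
--                         results.update(go(t, d - 1))
--         cache[(s, d)] = results
--         return results
--
--     return go(s, min(h_limit - h, f_limit - f, e_limit - e))
-- ===== Notes on version B (the rewrite author's own statement) =====
-- stated objective: alternative
-- what changed: Replaces the naive recursion on four state variables by dynamic programming: the three lockstep counters are collapsed into one remaining depth d, and each (string, d) state's result set is memoized so a shared subtree is expanded only once instead of once per path reaching it.
import Mathlib
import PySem

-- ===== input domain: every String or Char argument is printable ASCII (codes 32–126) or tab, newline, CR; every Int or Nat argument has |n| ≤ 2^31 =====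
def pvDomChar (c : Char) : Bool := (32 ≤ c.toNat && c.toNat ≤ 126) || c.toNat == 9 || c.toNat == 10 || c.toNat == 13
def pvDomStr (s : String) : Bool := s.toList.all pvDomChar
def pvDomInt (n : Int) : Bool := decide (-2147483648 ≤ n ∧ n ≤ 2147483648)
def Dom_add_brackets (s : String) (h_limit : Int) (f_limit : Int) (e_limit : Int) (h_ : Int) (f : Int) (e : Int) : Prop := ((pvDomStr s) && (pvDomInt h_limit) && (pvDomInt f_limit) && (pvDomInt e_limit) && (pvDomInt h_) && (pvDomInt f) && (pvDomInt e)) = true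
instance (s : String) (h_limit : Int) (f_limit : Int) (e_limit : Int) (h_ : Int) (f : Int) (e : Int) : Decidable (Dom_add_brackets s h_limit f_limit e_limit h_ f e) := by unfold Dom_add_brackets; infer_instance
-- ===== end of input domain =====

-- B collapses the three lockstep counters into one remaining depth d and memoizes the
-- recursion on the state (s, d), so each state is expanded once (objective: alternative).

-- shared one-liner: the Python expression t = s[:j] + '(' + s[j:j+i] + ')' + s[j+i:]
def pvIns (s : String) (j : Int) (i : Int) : String :=
  PySem.Str.slice s none (some j) ++ "(" ++ PySem.Str.slice s (some j) (some (j + i)) ++ ")" ++ PySem.Str.slice s (some (j + i)) none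

-- ===== PORT A =====
-- Port of A: naive recursion; Python sets are PySem.Set lists in insertion order.
def add_brackets (s : String) (h_limit : Int) (f_limit : Int) (e_limit : Int) (h_ : Int) (f : Int) (e : Int) : List String :=
  if h_ ≥ h_limit ∨ f ≥ f_limit ∨ e ≥ e_limit ∨ PySem.Str.len s ≤ 2 then
    PySem.Set.add PySem.Set.empty s
  else
    (PySem.List.pyRange 1 (min e_limit (PySem.Str.len s) + 1) 1).foldl (fun results i =>
      (PySem.List.pyRange 0 (PySem.Str.len s - i + 1) 1).foldl (fun results j =>
        if PySem.Str.strip (PySem.Str.slice s (some j) (some (j + i))) ≠ "" then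
          if PySem.Str.isIn "()" (pvIns s j i) = false then
            PySem.Set.update (PySem.Set.add results (pvIns s j i))
              (add_brackets (pvIns s j i) h_limit f_limit e_limit (h_ + 1) (f + 1) (e + 1))
          else results
        else results) results) PySem.Set.empty
termination_by (h_limit - h_).toNat
decreasing_by
  have hnot : ¬(h_ ≥ h_limit ∨ f ≥ f_limit ∨ e ≥ e_limit ∨ PySem.Str.len s ≤ 2) := by assumption
  simp only [not_or] at hnot
  omega

-- ===== PORT B =====
-- B-side helper: Python's inner `go` — recursion on (s, remaining depth d), threading the cache.
def pvGoMemo (e_limit : Int) (s : String) (d : Int) (cache : PySem.Dict (String × Int) (List String)) : List String × PySem.Dict (String × Int) (List String) :=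
  if d ≤ 0 ∨ PySem.Str.len s ≤ 2 then
    (PySem.Set.add PySem.Set.empty s, cache)
  else
    match cache.get? (s, d) with
    | some hit => (hit, cache)
    | none =>
      let p := (PySem.List.pyRange 1 (min e_limit (PySem.Str.len s) + 1) 1).foldl (fun acc i =>
        (PySem.List.pyRange 0 (PySem.Str.len s - i + 1) 1).foldl (fun (acc : List String × PySem.Dict (String × Int) (List String)) j =>
          if PySem.Str.strip (PySem.Str.slice s (some j) (some (j + i))) ≠ "" then
            if PySem.Str.isIn "()" (pvIns s j i) = false then
              let r := pvGoMemo e_limit (pvIns s j i) (d - 1) acc.2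
              (PySem.Set.update (PySem.Set.add acc.1 (pvIns s j i)) r.1, r.2)
            else acc
          else acc) acc) (PySem.Set.empty, cache)
      (p.1, p.2.insert (s, d) p.1)
termination_by d.toNat
decreasing_by
  have hnot : ¬(d ≤ 0 ∨ PySem.Str.len s ≤ 2) := by assumption
  simp only [not_or] at hnot
  omega

def add_brackets_alt (s : String) (h_limit : Int) (f_limit : Int) (e_limit : Int) (h_ : Int) (f : Int) (e : Int) : List String :=
  (pvGoMemo e_limit s (min (h_limit - h_) (min (f_limit - f) (e_limit - e))) PySem.Dict.empty).1

-- ===== PRECONDITION & SPEC =====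
def Spec_add_brackets (s : String) (h_limit : Int) (f_limit : Int) (e_limit : Int) (h_ : Int) (f : Int) (e : Int) (out : List String) : Prop := out = add_brackets_alt s h_limit f_limit e_limit h_ f e
instance (s : String) (h_limit : Int) (f_limit : Int) (e_limit : Int) (h_ : Int) (f : Int) (e : Int) (out : List String) : Decidable (Spec_add_brackets s h_limit f_limit e_limit h_ f e out) := by unfold Spec_add_brackets; infer_instance

-- ===== CLAIM (what is proved, stated in full; the proofs are below) =====
def Claim_equal_add_brackets : Prop := ∀ (s : String) (h_limit : Int) (f_limit : Int) (e_limit : Int) (h_ : Int) (f : Int) (e : Int), Dom_add_brackets s h_limit f_limit e_limit h_ f e → Spec_add_brackets s h_limit f_limit e_limit h_ f e (add_brackets s h_limit f_limit e_limit h_ f e)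

-- ===== LEMMAS AND PROOFS =====

-- Cache invariant: an entry at key (s, d) is port A's value at every (h, f, e) whose
-- remaining depth min(h_limit-h, f_limit-f, e_limit-e) is d.
def pvGoodCache (h_limit : Int) (f_limit : Int) (e_limit : Int) (c : PySem.Dict (String × Int) (List String)) : Prop :=
  ∀ k v, c.get? k = some v →
    ∀ h_ f e : Int, min (h_limit - h_) (min (f_limit - f) (e_limit - e)) = k.2 →
      v = add_brackets k.1 h_limit f_limit e_limit h_ f e

-- Relational foldl: a step-wise relation between two accumulators is preserved by foldl.
lemma pvFoldlRel {α β γ : Type} (R : β → γ → Prop) (fA : β → α → β) (fB : γ → α → γ)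
    (hstep : ∀ b c a, R b c → R (fA b a) (fB c a)) :
    ∀ (l : List α) (b : β) (c : γ), R b c → R (l.foldl fA b) (l.foldl fB c) := by
  intro l
  induction l with
  | nil => intro b c h; exact h
  | cons a l ih => intro b c h; exact ih _ _ (hstep _ _ _ h)

lemma pvGoMemo_correct (h_limit f_limit e_limit : Int) :
    ∀ (n : Nat) (s : String) (d : Int) (c : PySem.Dict (String × Int) (List String)),
      d.toNat ≤ n → pvGoodCache h_limit f_limit e_limit c →
      (∀ h_ f e : Int, min (h_limit - h_) (min (f_limit - f) (e_limit - e)) = d →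
        (pvGoMemo e_limit s d c).1 = add_brackets s h_limit f_limit e_limit h_ f e)
      ∧ pvGoodCache h_limit f_limit e_limit (pvGoMemo e_limit s d c).2 := by
  intro n
  induction n with
  | zero =>
    intro s d c hn hc
    rw [pvGoMemo.eq_def, if_pos (Or.inl (by omega : d ≤ 0))]
    refine ⟨?_, hc⟩
    intro h_ f e hm
    rw [add_brackets.eq_def, if_pos (by omega :
      h_ ≥ h_limit ∨ f ≥ f_limit ∨ e ≥ e_limit ∨ PySem.Str.len s ≤ 2)]
  | succ n ih =>
    intro s d c hn hc
    rw [pvGoMemo.eq_def]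
    by_cases hb : d ≤ 0 ∨ PySem.Str.len s ≤ 2
    · rw [if_pos hb]
      refine ⟨?_, hc⟩
      intro h_ f e hm
      rw [add_brackets.eq_def, if_pos (by omega :
        h_ ≥ h_limit ∨ f ≥ f_limit ∨ e ≥ e_limit ∨ PySem.Str.len s ≤ 2)]
    · rw [if_neg hb]
      rw [not_or] at hb
      have key : ∀ h_ f e : Int, min (h_limit - h_) (min (f_limit - f) (e_limit - e)) = d →
          ((PySem.List.pyRange 1 (min e_limit (PySem.Str.len s) + 1) 1).foldl (fun results i =>
              (PySem.List.pyRange 0 (PySem.Str.len s - i + 1) 1).foldl (fun results j =>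
                if PySem.Str.strip (PySem.Str.slice s (some j) (some (j + i))) ≠ "" then
                  if PySem.Str.isIn "()" (pvIns s j i) = false then
                    PySem.Set.update (PySem.Set.add results (pvIns s j i))
                      (add_brackets (pvIns s j i) h_limit f_limit e_limit (h_ + 1) (f + 1) (e + 1))
                  else results
                else results) results) PySem.Set.empty)
            = ((PySem.List.pyRange 1 (min e_limit (PySem.Str.len s) + 1) 1).foldl (fun acc i =>
              (PySem.List.pyRange 0 (PySem.Str.len s - i + 1) 1).foldl (fun (acc : List String × PySem.Dict (String × Int) (List String)) j =>
                if PySem.Str.strip (PySem.Str.slice s (some j) (some (j + i))) ≠ "" then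
                  if PySem.Str.isIn "()" (pvIns s j i) = false then
                    let r := pvGoMemo e_limit (pvIns s j i) (d - 1) acc.2
                    (PySem.Set.update (PySem.Set.add acc.1 (pvIns s j i)) r.1, r.2)
                  else acc
                else acc) acc) (PySem.Set.empty, c)).1
          ∧ pvGoodCache h_limit f_limit e_limit
              ((PySem.List.pyRange 1 (min e_limit (PySem.Str.len s) + 1) 1).foldl (fun acc i =>
              (PySem.List.pyRange 0 (PySem.Str.len s - i + 1) 1).foldl (fun (acc : List String × PySem.Dict (String × Int) (List String)) j =>
                if PySem.Str.strip (PySem.Str.slice s (some j) (some (j + i))) ≠ "" then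
                  if PySem.Str.isIn "()" (pvIns s j i) = false then
                    let r := pvGoMemo e_limit (pvIns s j i) (d - 1) acc.2
                    (PySem.Set.update (PySem.Set.add acc.1 (pvIns s j i)) r.1, r.2)
                  else acc
                else acc) acc) (PySem.Set.empty, c)).2 := by
        intro h_ f e hm
        refine pvFoldlRel
          (fun (rA : List String) (p : List String × PySem.Dict (String × Int) (List String)) =>
            rA = p.1 ∧ pvGoodCache h_limit f_limit e_limit p.2) _ _ ?_ _ _ _ ⟨rfl, hc⟩
        intro b c0 i hbc
        refine pvFoldlRel
          (fun (rA : List String) (p : List String × PySem.Dict (String × Int) (List String)) =>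
            rA = p.1 ∧ pvGoodCache h_limit f_limit e_limit p.2) _ _ ?_ _ _ _ hbc
        intro b1 c1 j hbc1
        obtain ⟨hb1, hg1⟩ := hbc1
        dsimp only
        split_ifs with hs hp
        · obtain ⟨hall, hg⟩ := ih (pvIns s j i) (d - 1) c1.2 (by omega) hg1
          have he := hall (h_ + 1) (f + 1) (e + 1) (by omega)
          exact ⟨by rw [hb1, he], hg⟩
        · exact ⟨hb1, hg1⟩
        · exact ⟨hb1, hg1⟩
      cases hget : c.get? (s, d) with
      | some hit =>
        dsimp only
        refine ⟨?_, hc⟩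
        intro h_ f e hm
        exact hc (s, d) hit hget h_ f e hm
      | none =>
        dsimp only
        have hmain : ∀ h_ f e : Int, min (h_limit - h_) (min (f_limit - f) (e_limit - e)) = d →
            ((PySem.List.pyRange 1 (min e_limit (PySem.Str.len s) + 1) 1).foldl (fun acc i =>
              (PySem.List.pyRange 0 (PySem.Str.len s - i + 1) 1).foldl (fun (acc : List String × PySem.Dict (String × Int) (List String)) j =>
                if PySem.Str.strip (PySem.Str.slice s (some j) (some (j + i))) ≠ "" then
                  if PySem.Str.isIn "()" (pvIns s j i) = false then
                    let r := pvGoMemo e_limit (pvIns s j i) (d - 1) acc.2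
                    (PySem.Set.update (PySem.Set.add acc.1 (pvIns s j i)) r.1, r.2)
                  else acc
                else acc) acc) (PySem.Set.empty, c)).1
            = add_brackets s h_limit f_limit e_limit h_ f e := by
          intro h_ f e hm
          have hA : add_brackets s h_limit f_limit e_limit h_ f e
              = (PySem.List.pyRange 1 (min e_limit (PySem.Str.len s) + 1) 1).foldl (fun results i =>
                  (PySem.List.pyRange 0 (PySem.Str.len s - i + 1) 1).foldl (fun results j =>
                    if PySem.Str.strip (PySem.Str.slice s (some j) (some (j + i))) ≠ "" then
                      if PySem.Str.isIn "()" (pvIns s j i) = false then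
                        PySem.Set.update (PySem.Set.add results (pvIns s j i))
                          (add_brackets (pvIns s j i) h_limit f_limit e_limit (h_ + 1) (f + 1) (e + 1))
                      else results
                    else results) results) PySem.Set.empty := by
            rw [add_brackets.eq_def, if_neg (by omega :
              ¬(h_ ≥ h_limit ∨ f ≥ f_limit ∨ e ≥ e_limit ∨ PySem.Str.len s ≤ 2))]
          rw [hA]
          exact (key h_ f e hm).1.symm
        refine ⟨hmain, ?_⟩
        intro k v hkv
        by_cases hk : k = (s, d)
        · subst hk
          rw [PySem.Dict.get?_insert_self] at hkv
          cases hkv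
          exact hmain
        · rw [PySem.Dict.get?_insert_of_ne _ _ hk] at hkv
          exact (key (h_limit - d) (f_limit - d) (e_limit - d) (by omega)).2 k v hkv

-- ===== VERDICT (by name: the statement is the Claim_ definition above) =====
theorem add_brackets_spec : Claim_equal_add_brackets := by
  intro s h_limit f_limit e_limit h_ f e _
  unfold Spec_add_brackets add_brackets_alt
  have hempty : pvGoodCache h_limit f_limit e_limit PySem.Dict.empty := by
    intro k v hkv
    rw [PySem.Dict.get?_empty] at hkv
    cases hkv
  exact ((pvGoMemo_correct h_limit f_limit e_limit
      (min (h_limit - h_) (min (f_limit - f) (e_limit - e))).toNat s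
      (min (h_limit - h_) (min (f_limit - f) (e_limit - e))) PySem.Dict.empty
      le_rfl hempty).1 h_ f e rfl).symm
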